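-- pv_equiv track=rewrite | github.com/ponchik18/Python-programming | Laba 2/third.py | matrix_change
-- ===== SOURCE A (Python) =====
-- def matrix_change(matrix, row, column):
--     if not (isinstance(matrix, list) or isinstance(matrix[0], list)):
--         raise TypeError("Функция '%s' ожидает матрицу!" % matrix_change.__name__)
--     index_matrix = int(-1)
--     for i in range(row):
--         flag = False
--         for j in range(column-1):
--             if matrix[i][j] > matrix[i][j+1]:
--                 flag = True
--         if not flag:
--             index_matrix = i
--     if index_matrix != -1:
--         for j in range(int(column/2)):
--             tmp = matrix[index_matrix][column-j-1]
--             matrix[index_matrix][column-j-1] = matrix[index_matrix][j]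
--             matrix[index_matrix][j] = tmp
--     else:
--         raise ValueError("Нет строк в порядке возрастания")
--     return matrix
-- ===== SOURCE B (Python) =====
-- def matrix_change(matrix, row, column):
--     if not (isinstance(matrix, list) or isinstance(matrix[0], list)):
--         raise TypeError("Функция '%s' ожидает матрицу!" % matrix_change.__name__)
--     c = max(column, 0)
--     for i, r in reversed(list(enumerate(matrix[:row]))):
--         pfx = r[:c]
--         if pfx == sorted(pfx):
--             matrix[i][:c] = pfx[::-1]
--             return matrix
--     raise ValueError("Нет строк в порядке возрастания")
-- ===== Notes on version B (the rewrite author's own statement) =====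
-- stated objective: idiomatic
-- what changed: A scans all rows front-to-back with a nested adjacent-pair flag loop to remember the last sorted row and then reverses it with an index-swapping half loop; B walks reversed(list(enumerate(matrix[:row]))) and, at the first row whose prefix equals its sorted copy, reverses it by slice assignment and returns early.
-- outside the precondition, e.g. on matrix_change([], 3, 1): A returns [], B raises ValueError
import Mathlib
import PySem

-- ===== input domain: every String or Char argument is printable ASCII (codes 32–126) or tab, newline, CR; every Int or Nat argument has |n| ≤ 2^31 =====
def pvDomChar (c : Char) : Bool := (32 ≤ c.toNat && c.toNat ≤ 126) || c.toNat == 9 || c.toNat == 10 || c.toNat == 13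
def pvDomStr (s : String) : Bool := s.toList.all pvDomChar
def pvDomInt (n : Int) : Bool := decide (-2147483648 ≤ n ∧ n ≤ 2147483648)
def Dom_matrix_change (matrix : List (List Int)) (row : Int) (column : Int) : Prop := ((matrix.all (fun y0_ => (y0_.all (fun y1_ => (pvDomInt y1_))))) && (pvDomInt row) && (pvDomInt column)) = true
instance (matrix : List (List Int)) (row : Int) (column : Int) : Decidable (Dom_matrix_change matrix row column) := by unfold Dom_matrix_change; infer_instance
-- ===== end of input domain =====

-- B re-implements the search idiomatically (scan the rows back-to-front with enumerate, test sortedness by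
-- comparing a prefix with its sorted copy, reverse by slice assignment); equivalence is about the RETURN value,
-- both programs mutate the chosen row of `matrix` in place the same way.

-- ===== PORT A =====
-- The TypeError guard of A never fires (matrix is a list), so it is not ported.
-- `int(column/2)` is truncating division: Int.tdiv (exact, |column| ≤ 2^31 < 2^53).
-- The ValueError branch (index_matrix = -1) returns `matrix` here; Pre_ excludes those inputs.
def matrix_change (matrix : List (List Int)) (row : Int) (column : Int) : List (List Int) :=
  let index_matrix : Int :=
    (PySem.List.pyRange 0 row 1).foldl (fun idx i =>
      let flag := (PySem.List.pyRange 0 (column - 1) 1).foldl (fun fl j =>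
        if PySem.List.pyGetD (PySem.List.pyGetD matrix i []) j 0 >
           PySem.List.pyGetD (PySem.List.pyGetD matrix i []) (j + 1) 0 then true else fl) false
      if !flag then i else idx) (-1)
  if index_matrix ≠ -1 then
    (PySem.List.pyRange 0 (Int.tdiv column 2) 1).foldl (fun m j =>
      let tmp := PySem.List.pyGetD (PySem.List.pyGetD m index_matrix []) (column - j - 1) 0
      let m1 := PySem.List.pySetD m index_matrix
        (PySem.List.pySetD (PySem.List.pyGetD m index_matrix []) (column - j - 1)
          (PySem.List.pyGetD (PySem.List.pyGetD m index_matrix []) j 0))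
      PySem.List.pySetD m1 index_matrix
        (PySem.List.pySetD (PySem.List.pyGetD m1 index_matrix []) j tmp)) matrix
  else matrix

-- ===== PORT B =====
-- loop body of B: walk the reversed enumerate list; on the first sorted prefix, do the slice assignment and stop.
-- The ValueError branch (no sorted row) returns `matrix` here; Pre_ excludes those inputs.
def matrix_change_altLoop (matrix : List (List Int)) (c : Nat) : List (Int × List Int) → List (List Int)
  | [] => matrix
  | (i, r) :: rest =>
      let pfx := r.take c
      if PySem.List.sorted pfx (fun x => x) false = pfx then
        PySem.List.pySetD matrix i (pfx.reverse ++ r.drop c)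
      else matrix_change_altLoop matrix c rest

def matrix_change_alt (matrix : List (List Int)) (row : Int) (column : Int) : List (List Int) :=
  let c := (max column 0).toNat   -- c = max(column, 0); r[:c] = r.take c since 0 ≤ c
  matrix_change_altLoop matrix c
    ((PySem.List.enumerate (PySem.List.slice matrix none (some row)) 0).reverse)

-- ===== PRECONDITION & SPEC =====
-- Pre_ excludes every input on which A raises (row with too few columns scanned with column ≥ 2: IndexError;
-- no qualifying row: ValueError), and one family on which A returns only by accident of its empty loops while B
-- raises: matrix = [] with row ≥ 1 and column ≤ 1, where A touches no row and returns [] unchanged, while B's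
-- search over the (empty) rows finds no sorted row and raises ValueError.
def Pre_matrix_change (matrix : List (List Int)) (row : Int) (column : Int) : Prop :=
  1 ≤ row ∧ matrix ≠ [] ∧ (row ≤ (matrix.length : Int) ∨ column ≤ 1) ∧
  (∀ i < min row.toNat matrix.length,
      column ≤ 1 ∨ column ≤ ((matrix.getD i []).length : Int)) ∧
  (∃ i < min row.toNat matrix.length,
      ((matrix.getD i []).take (max column 0).toNat).Pairwise (· ≤ ·))
instance (matrix : List (List Int)) (row : Int) (column : Int) : Decidable (Pre_matrix_change matrix row column) := by unfold Pre_matrix_change; infer_instance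

def pvWitness_matrix_change : List (List Int) × Int × Int := ([[1, 2], [3, 1]], 2, 2)

def Spec_matrix_change (matrix : List (List Int)) (row : Int) (column : Int) (out : List (List Int)) : Prop := out = matrix_change_alt matrix row column
instance (matrix : List (List Int)) (row : Int) (column : Int) (out : List (List Int)) : Decidable (Spec_matrix_change matrix row column out) := by unfold Spec_matrix_change; infer_instance

-- ===== CLAIM (what is proved, stated in full; the proofs are below) =====
def Claim_equal_matrix_change : Prop := ∀ (matrix : List (List Int)) (row : Int) (column : Int), Dom_matrix_change matrix row column → Pre_matrix_change matrix row column → Spec_matrix_change matrix row column (matrix_change matrix row column)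

-- ===== LEMMAS AND PROOFS =====

-- A Boolean `flag` fold is an `any`.
theorem pv_foldl_or {P : Int → Prop} [DecidablePred P] : ∀ (l : List Int) (b : Bool),
    l.foldl (fun fl j => if P j then true else fl) b = (b || l.any (fun j => decide (P j))) := by
  intro l
  induction l with
  | nil => simp
  | cons x t ih =>
    intro b
    simp only [List.foldl_cons, List.any_cons, ih]
    by_cases hx : P x <;> simp [hx]

-- A "keep the last index that satisfies p" fold is a find? on the reversed list.
theorem pv_foldl_last (p : Int → Bool) : ∀ (l : List Int) (a : Int),
    l.foldl (fun idx i => if p i then i else idx) a = (l.reverse.find? p).getD a := by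
  intro l
  induction l with
  | nil => simp
  | cons x t ih =>
    intro a
    simp only [List.foldl_cons, List.reverse_cons, List.find?_append, ih]
    cases ht : t.reverse.find? p <;> cases hx : p x <;> simp [List.find?, hx]

-- A list is a fixed point of sorting iff it is nondecreasing.
theorem pv_sorted_fix_iff (p : List Int) :
    (PySem.List.sorted p (fun x => x) false = p) ↔ p.Pairwise (· ≤ ·) := by
  constructor
  · intro h
    have := PySem.List.sorted_pairwise p (fun x => x)
    rw [h] at this
    exact this
  · intro h
    exact PySem.List.sorted_eq_self_of_pairwise p (fun x => x) h

-- altLoop is find?-then-rewrite.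
theorem pv_altLoop_eq_find (matrix : List (List Int)) (c : Nat) : ∀ (l : List (Int × List Int)),
    matrix_change_altLoop matrix c l =
      match l.find? (fun pr => decide (PySem.List.sorted (pr.2.take c) (fun x => x) false = pr.2.take c)) with
      | some pr => PySem.List.pySetD matrix pr.1 ((pr.2.take c).reverse ++ pr.2.drop c)
      | none => matrix := by
  intro l
  induction l with
  | nil => rfl
  | cons pr rest ih =>
    obtain ⟨i, r⟩ := pr
    rw [List.find?_cons]
    by_cases h : PySem.List.sorted (r.take c) (fun x => x) false = r.take c
    · simp only [matrix_change_altLoop, if_pos h, decide_eq_true h]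
    · simp only [matrix_change_altLoop, if_neg h, decide_eq_false h, ih]

-- reversing a prefix of length ≤ 1 is the identity
theorem pv_short_rev (r : List Int) (c : Nat) (hc : c ≤ 1) :
    (r.take c).reverse ++ r.drop c = r := by
  interval_cases c
  · simp
  · cases r <;> simp

theorem pv_pairwise_short (x : List Int) (h : x.length ≤ 1) : x.Pairwise (· ≤ ·) := by
  cases x with
  | nil => simp
  | cons a t => cases t with
    | nil => simp
    | cons b u => simp at h

theorem pv_find?_const_true (l : List Int) : l.find? (fun _ => true) = l.head? := by
  cases l <;> simp [List.find?]

theorem pv_pairwise_take_iff (r : List Int) (c : Nat) (hc : c ≤ r.length) :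
    (r.take c).Pairwise (· ≤ ·) ↔ ∀ j : Nat, j + 1 < c → r.getD j 0 ≤ r.getD (j + 1) 0 := by
  rw [← List.isChain_iff_pairwise, List.isChain_iff_getElem]
  have hlen : (r.take c).length = c := by simp [List.length_take]; omega
  constructor
  · intro h j hj
    have := h j (by omega)
    rw [List.getElem_take, List.getElem_take] at this
    rw [List.getD_eq_getElem r 0 (by omega), List.getD_eq_getElem r 0 (by omega)]
    exact this
  · intro h j hj
    rw [List.getElem_take, List.getElem_take]
    have := h j (by omega)
    rwa [List.getD_eq_getElem r 0 (by omega), List.getD_eq_getElem r 0 (by omega)] at this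

theorem pv_revpfx_getElem? (r : List Int) (c : Nat) (hc : c ≤ r.length) (k : Nat) :
    ((r.take c).reverse ++ r.drop c)[k]? = if k < c then r[c - 1 - k]? else r[k]? := by
  have hl2 : (List.take c r).length = c := by simp [List.length_take]; omega
  have hlen : (r.take c).reverse.length = c := by simp [hl2]
  by_cases hk : k < c
  · rw [List.getElem?_append_left (by omega), List.getElem?_reverse (by omega), if_pos hk,
      hl2, List.getElem?_take, if_pos (by omega)]
  · rw [List.getElem?_append_right (by omega), List.getElem?_drop, if_neg hk, hlen]
    congr 1
    omega

theorem pv_tdiv_nat (c : Nat) : Int.tdiv (c : Int) 2 = ((c / 2 : Nat) : Int) := by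
  simp [Int.tdiv]

theorem pv_get_set (m : List (List Int)) (idx : Int) (h0 : 0 ≤ idx) (h : idx.toNat < m.length)
    (v : List Int) : PySem.List.pyGetD (PySem.List.pySetD m idx v) idx [] = v := by
  rw [PySem.List.pySetD_of_nonneg m v h0,
    PySem.List.pyGetD_eq_getElem _ _ h0 (by simp; omega)]
  exact List.getElem_set_self (by simpa using h)

theorem pv_set_set (m : List (List Int)) (idx : Int) (h0 : 0 ≤ idx) (a b : List Int) :
    PySem.List.pySetD (PySem.List.pySetD m idx a) idx b = PySem.List.pySetD m idx b := by
  rw [PySem.List.pySetD_of_nonneg m a h0, PySem.List.pySetD_of_nonneg _ b h0,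
    PySem.List.pySetD_of_nonneg m b h0, List.set_set]

theorem pv_set_self (m : List (List Int)) (idx : Int) (h0 : 0 ≤ idx) (h : idx.toNat < m.length) :
    PySem.List.pySetD m idx (PySem.List.pyGetD m idx []) = m := by
  rw [PySem.List.pySetD_of_nonneg m _ h0, PySem.List.pyGetD_eq_getElem _ _ h0 (by omega)]
  exact List.set_getElem_self h

theorem pv_factor (column idx : Int) (h0 : 0 ≤ idx) :
    ∀ (l : List Int) (m : List (List Int)), idx.toNat < m.length →
    l.foldl (fun m j =>
      PySem.List.pySetD
        (PySem.List.pySetD m idx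
          (PySem.List.pySetD (PySem.List.pyGetD m idx []) (column - j - 1)
            (PySem.List.pyGetD (PySem.List.pyGetD m idx []) j 0)))
        idx
        (PySem.List.pySetD
          (PySem.List.pyGetD
            (PySem.List.pySetD m idx
              (PySem.List.pySetD (PySem.List.pyGetD m idx []) (column - j - 1)
                (PySem.List.pyGetD (PySem.List.pyGetD m idx []) j 0))) idx [])
          j (PySem.List.pyGetD (PySem.List.pyGetD m idx []) (column - j - 1) 0)))
      m
    = PySem.List.pySetD m idx (l.foldl (fun r j =>
        PySem.List.pySetD (PySem.List.pySetD r (column - j - 1) (PySem.List.pyGetD r j 0)) j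
          (PySem.List.pyGetD r (column - j - 1) 0)) (PySem.List.pyGetD m idx [])) := by
  intro l
  induction l with
  | nil =>
    intro m hm
    rw [List.foldl_nil, List.foldl_nil, pv_set_self m idx h0 hm]
  | cons j l ih =>
    intro m hm
    rw [List.foldl_cons, List.foldl_cons]
    rw [pv_get_set m idx h0 hm, pv_set_set m idx h0]
    rw [ih _ (by rw [PySem.List.length_pySetD]; exact hm)]
    rw [pv_get_set m idx h0 hm, pv_set_set m idx h0]

theorem pv_swap_inv (r : List Int) (c : Nat) (hc : c ≤ r.length) :
    ∀ t, t ≤ c / 2 →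
      (((List.range t).foldl (fun r' (k : Nat) =>
          PySem.List.pySetD (PySem.List.pySetD r' ((c : Int) - (k : Int) - 1)
              (PySem.List.pyGetD r' (k : Int) 0)) (k : Int)
              (PySem.List.pyGetD r' ((c : Int) - (k : Int) - 1) 0)) r).length = r.length)
      ∧ (∀ k : Nat, ((List.range t).foldl (fun r' (k : Nat) =>
          PySem.List.pySetD (PySem.List.pySetD r' ((c : Int) - (k : Int) - 1)
              (PySem.List.pyGetD r' (k : Int) 0)) (k : Int)
              (PySem.List.pyGetD r' ((c : Int) - (k : Int) - 1) 0)) r)[k]?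
          = if k < t ∨ (c - t ≤ k ∧ k < c) then r[c - 1 - k]? else r[k]?) := by
  intro t
  induction t with
  | zero =>
    intro _
    refine ⟨by simp, fun k => ?_⟩
    rw [List.range_zero, List.foldl_nil]
    split_ifs with h
    · exact absurd h (by omega)
    · rfl
  | succ t ih =>
    intro ht
    obtain ⟨ihlen, ihget⟩ := ih (by omega)
    set F := (List.range t).foldl (fun r' (k : Nat) =>
          PySem.List.pySetD (PySem.List.pySetD r' ((c : Int) - (k : Int) - 1)
              (PySem.List.pyGetD r' (k : Int) 0)) (k : Int)
              (PySem.List.pyGetD r' ((c : Int) - (k : Int) - 1) 0)) r with hF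
    have hstep : (List.range (t+1)).foldl (fun r' (k : Nat) =>
          PySem.List.pySetD (PySem.List.pySetD r' ((c : Int) - (k : Int) - 1)
              (PySem.List.pyGetD r' (k : Int) 0)) (k : Int)
              (PySem.List.pyGetD r' ((c : Int) - (k : Int) - 1) 0)) r
        = PySem.List.pySetD (PySem.List.pySetD F ((c : Int) - (t : Int) - 1)
              (PySem.List.pyGetD F (t : Int) 0)) (t : Int)
              (PySem.List.pyGetD F ((c : Int) - (t : Int) - 1) 0) := by
      rw [List.range_succ, List.foldl_append, List.foldl_cons, List.foldl_nil, hF]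
    have hcast : (c : Int) - (t : Int) - 1 = ((c - 1 - t : Nat) : Int) := by omega
    have htc : t < c := by omega
    have hFt : F[t]? = some r[t] := by
      rw [ihget t, if_neg (by omega), List.getElem?_eq_getElem (by omega)]
    have hFa : F[c - 1 - t]? = some r[c - 1 - t] := by
      rw [ihget (c - 1 - t), if_neg (by omega), List.getElem?_eq_getElem (by omega)]
    have hgt : PySem.List.pyGetD F (t : Int) 0 = r[t] := by
      rw [PySem.List.pyGetD_natCast, List.getD_eq_getElem?_getD, hFt]; rfl
    have hga : PySem.List.pyGetD F (((c - 1 - t : Nat) : Int)) 0 = r[c - 1 - t] := by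
      rw [PySem.List.pyGetD_natCast, List.getD_eq_getElem?_getD, hFa]; rfl
    rw [hstep, hcast, hgt, hga, PySem.List.pySetD_natCast, PySem.List.pySetD_natCast]
    constructor
    · simp [ihlen]
    · intro k
      rw [List.getElem?_set, List.getElem?_set]
      have hlenF : F.length = r.length := ihlen
      by_cases hkt : t = k
      · subst hkt
        rw [if_pos rfl]
        simp only [List.length_set, hlenF]
        rw [if_pos (by omega), if_pos (by omega : t < t + 1 ∨ (c - (t+1) ≤ t ∧ t < c))]
        rw [List.getElem?_eq_getElem (by omega)]
      · rw [if_neg hkt]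
        by_cases hka : c - 1 - t = k
        · subst hka
          rw [if_pos rfl, if_pos (by omega)]
          have : c - 1 - (c - 1 - t) = t := by omega
          rw [if_pos (by omega : c - 1 - t < t + 1 ∨ (c - (t+1) ≤ c - 1 - t ∧ c - 1 - t < c)), this,
            List.getElem?_eq_getElem (by omega)]
        · rw [if_neg hka, ihget k]
          have : (k < t ∨ (c - t ≤ k ∧ k < c)) ↔ (k < t + 1 ∨ (c - (t+1) ≤ k ∧ k < c)) := by omega
          rw [if_congr this rfl rfl]

theorem pv_swap (column : Int) (r : List Int) (h2 : 2 ≤ column)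
    (hlen : column ≤ (r.length : Int)) :
    (PySem.List.pyRange 0 (Int.tdiv column 2) 1).foldl
      (fun r' j => PySem.List.pySetD (PySem.List.pySetD r' (column - j - 1)
        (PySem.List.pyGetD r' j 0)) j (PySem.List.pyGetD r' (column - j - 1) 0)) r
    = (r.take column.toNat).reverse ++ r.drop column.toNat := by
  have hcol : column = ((column.toNat : Nat) : Int) := by omega
  set c := column.toNat with hc
  have hcr : c ≤ r.length := by omega
  rw [hcol, pv_tdiv_nat, PySem.List.pyRange_one]
  simp only [Int.sub_zero, Int.toNat_natCast, zero_add, List.foldl_map]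
  obtain ⟨_, hget⟩ := pv_swap_inv r c hcr (c / 2) (le_refl _)
  apply List.ext_getElem?
  intro k
  rw [hget k, pv_revpfx_getElem? r c hcr k]
  split_ifs with hA hB hB
  · rfl
  · exact absurd hA (by omega)
  · have : c - 1 - k = k := by omega
    rw [this]
  · rfl

theorem pv_tdiv_le (a : Int) (h : a ≤ 1) : Int.tdiv a 2 ≤ 0 := by
  rcases a with n | n
  · match n, h with
    | 0, _ => decide
    | 1, _ => decide
  · have h1 : Int.tdiv (Int.negSucc n) 2 = -(((n + 1) / 2 : Nat) : Int) := rfl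
    rw [h1]; omega

theorem pv_getD_take (matrix : List (List Int)) (n k : Nat) (h : k < n) :
    (List.take n matrix).getD k [] = matrix.getD k [] := by
  rw [List.getD_eq_getElem?_getD, List.getElem?_take, if_pos h, List.getD_eq_getElem?_getD]

theorem pv_any_iff (r : List Int) (column : Int) (h2c : 2 ≤ column) (hcl : column ≤ (r.length : Int)) :
    ((PySem.List.pyRange 0 (column - 1) 1).any
        (fun j => decide (PySem.List.pyGetD r j 0 > PySem.List.pyGetD r (j + 1) 0)) = false)
      ↔ (PySem.List.sorted (List.take column.toNat r) (fun x => x) false = List.take column.toNat r) := by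
  rw [pv_sorted_fix_iff, pv_pairwise_take_iff r column.toNat (by omega), List.any_eq_false]
  constructor
  · intro h j hj
    have hmem : ((j : Nat) : Int) ∈ PySem.List.pyRange 0 (column - 1) 1 := by
      rw [PySem.List.mem_pyRange_one]; omega
    have := h _ hmem
    simp only [decide_eq_true_eq, not_lt] at this
    rwa [show ((j : Nat) : Int) + 1 = (((j + 1 : Nat)) : Int) by push_cast; ring,
      PySem.List.pyGetD_natCast, PySem.List.pyGetD_natCast] at this
  · intro h x hx
    rw [PySem.List.mem_pyRange_one] at hx
    have hxk : x = ((x.toNat : Nat) : Int) := by omega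
    simp only [decide_eq_true_eq, not_lt]
    rw [hxk, show ((x.toNat : Nat) : Int) + 1 = (((x.toNat + 1 : Nat)) : Int) by push_cast; ring,
      PySem.List.pyGetD_natCast, PySem.List.pyGetD_natCast]
    exact h x.toNat (by omega)

theorem pv_bridge (matrix : List (List Int)) (row column : Int) (h2c : 2 ≤ column)
    (h4 : ∀ i' < row.toNat, column ≤ ((matrix.getD i' []).length : Int)) :
    ∀ i ∈ (PySem.List.pyRange 0 row 1).reverse,
      (!((PySem.List.pyRange 0 (column - 1) 1).foldl (fun fl j =>
        if PySem.List.pyGetD (PySem.List.pyGetD matrix i []) j 0 >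
           PySem.List.pyGetD (PySem.List.pyGetD matrix i []) (j + 1) 0 then true else fl) false))
      = decide ((PySem.List.sorted (List.take column.toNat (PySem.List.pyGetD (List.take row.toNat matrix) i [])) (fun x => x) false)
          = List.take column.toNat (PySem.List.pyGetD (List.take row.toNat matrix) i [])) := by
  intro i hi
  rw [List.mem_reverse, PySem.List.mem_pyRange_one] at hi
  obtain ⟨hi0, hir⟩ := hi
  have hik : i = ((i.toNat : Nat) : Int) := by omega
  have hkn : i.toNat < row.toNat := by omega
  have hgA : PySem.List.pyGetD matrix i [] = matrix.getD i.toNat [] := by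
    conv_lhs => rw [hik]
    rw [PySem.List.pyGetD_natCast]
  have hgB : PySem.List.pyGetD (List.take row.toNat matrix) i [] = matrix.getD i.toNat [] := by
    conv_lhs => rw [hik]
    rw [PySem.List.pyGetD_natCast, pv_getD_take _ _ _ hkn]
  rw [hgA, hgB, pv_foldl_or, Bool.false_or]
  have hiff := pv_any_iff (matrix.getD i.toNat []) column h2c (h4 _ hkn)
  cases hany : (PySem.List.pyRange 0 (column - 1) 1).any
      (fun j => decide (PySem.List.pyGetD (matrix.getD i.toNat []) j 0 >
        PySem.List.pyGetD (matrix.getD i.toNat []) (j + 1) 0)) with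
  | false =>
    rw [Bool.not_false, decide_eq_true (hiff.mp hany)]
  | true =>
    rw [Bool.not_true]
    have : ¬ (PySem.List.sorted (List.take column.toNat (matrix.getD i.toNat [])) (fun x => x) false
        = List.take column.toNat (matrix.getD i.toNat [])) := by
      intro hS
      rw [hiff.mpr hS] at hany
      exact Bool.false_ne_true hany
    rw [decide_eq_false this]

theorem pv_find?_congr {α : Type} (p q : α → Bool) :
    ∀ (l : List α), (∀ x ∈ l, p x = q x) → l.find? p = l.find? q := by
  intro l
  induction l with
  | nil => simp
  | cons x t ih =>
    intro h
    have hx := h x (by simp)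
    simp only [List.find?_cons, hx]
    cases q x
    · exact ih (fun y hy => h y (by simp [hy]))
    · rfl

theorem matrix_change_spec_aux : ∀ (matrix : List (List Int)) (row : Int) (column : Int),
    Pre_matrix_change matrix row column →
    matrix_change matrix row column = matrix_change_alt matrix row column := by
  intro matrix row column hpre
  obtain ⟨h1, h2, h3, h4, h5⟩ := hpre
  have hL : 0 < matrix.length := List.length_pos_of_ne_nil h2
  have hrow0 : 0 ≤ row := by omega
  have hidx := pv_foldl_last
      (fun i => !((PySem.List.pyRange 0 (column - 1) 1).foldl (fun fl j =>
        if PySem.List.pyGetD (PySem.List.pyGetD matrix i []) j 0 >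
           PySem.List.pyGetD (PySem.List.pyGetD matrix i []) (j + 1) 0 then true else fl) false))
      (PySem.List.pyRange 0 row 1) (-1)
  simp only [matrix_change, matrix_change_alt]
  rw [hidx]
  rw [PySem.List.slice_to matrix hrow0]
  rw [PySem.List.enumerate_eq_map_pyRange _ ([] : List Int)]
  rw [← List.map_reverse]
  rw [pv_altLoop_eq_find, List.find?_map]
  by_cases hc1 : column ≤ 1
  · -- column ≤ 1: A's inner scan and the reversal loop are empty; A returns matrix unchanged,
    -- B rewrites the last considered row with itself.
    have hnil : PySem.List.pyRange 0 (column - 1) 1 = [] :=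
      PySem.List.pyRange_one_eq_nil (by omega)
    simp only [hnil, List.foldl_nil, Bool.not_false]
    rw [pv_find?_const_true, List.head?_reverse]
    have hsplit : PySem.List.pyRange 0 row 1 = PySem.List.pyRange 0 (row - 1) 1 ++ [row - 1] := by
      have h := PySem.List.pyRange_one_succ_right (a := 0) (b := row - 1) (by omega)
      rw [show row - 1 + 1 = row by ring] at h
      exact h
    rw [hsplit]
    have hlast : (PySem.List.pyRange 0 (row - 1) 1 ++ [row - 1]).getLast? = some (row - 1) := by
      simp
    rw [hlast]
    simp only [Option.getD_some]
    rw [if_pos (show row - 1 ≠ -1 by omega)]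
    have hnil2 : PySem.List.pyRange 0 (Int.tdiv column 2) 1 = [] :=
      PySem.List.pyRange_one_eq_nil (pv_tdiv_le column hc1)
    rw [hnil2, List.foldl_nil]
    have hlen2 : PySem.List.len (List.take row.toNat matrix)
        = ((min row.toNat matrix.length : Nat) : Int) := by
      simp [PySem.List.len, List.length_take]
    rw [hlen2]
    set m0 := min row.toNat matrix.length with hm0
    have hm01 : 1 ≤ m0 := by omega
    have hsplit2 : PySem.List.pyRange 0 ((m0 : Nat) : Int) 1
        = PySem.List.pyRange 0 (((m0 - 1 : Nat) : Nat) : Int) 1 ++ [((m0 - 1 : Nat) : Int)] := by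
      have h := PySem.List.pyRange_one_succ_right (a := 0) (b := ((m0 - 1 : Nat) : Int)) (by omega)
      rw [show ((m0 - 1 : Nat) : Int) + 1 = ((m0 : Nat) : Int) by omega] at h
      exact h
    rw [hsplit2, List.reverse_append, List.reverse_singleton, List.singleton_append]
    have hX : PySem.List.pyGetD (List.take row.toNat matrix) ((m0 - 1 : Nat) : Int) []
        = matrix.getD (m0 - 1) [] := by
      rw [PySem.List.pyGetD_natCast, pv_getD_take _ _ _ (by omega)]
    rw [List.find?_cons_of_pos (by
      simp only [Function.comp_apply]
      rw [hX]
      apply decide_eq_true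
      rw [pv_sorted_fix_iff]
      apply pv_pairwise_short
      simp only [List.length_take]
      omega)]
    simp only [Option.map_some]
    rw [hX, pv_short_rev _ _ (by omega : (max column 0).toNat ≤ 1)]
    rw [← PySem.List.pyGetD_natCast matrix (m0 - 1) []]
    exact (pv_set_self matrix ((m0 - 1 : Nat) : Int) (by omega) (by simp; omega)).symm
  · -- 2 ≤ column
    have h2c : 2 ≤ column := by omega
    have hrowL : row ≤ (matrix.length : Int) := by
      rcases h3 with h | h
      · exact h
      · omega
    have hlen2 : PySem.List.len (List.take row.toNat matrix) = ((row.toNat : Nat) : Int) := by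
      simp [PySem.List.len, List.length_take]
      omega
    rw [hlen2]
    have hrowcast : ((row.toNat : Nat) : Int) = row := Int.toNat_of_nonneg hrow0
    rw [hrowcast]
    have hmax : max column 0 = column := by omega
    simp only [hmax]
    rw [hmax] at h5
    have h4' : ∀ i' < row.toNat, column ≤ ((matrix.getD i' []).length : Int) := by
      intro i' hi'
      exact (h4 i' (by omega)).resolve_left (by omega)
    have hcong := pv_find?_congr
      ((fun pr => decide ((PySem.List.sorted (List.take column.toNat (Prod.snd pr)) (fun x => x) false) = List.take column.toNat (Prod.snd pr))) ∘
        (fun j => (j, PySem.List.pyGetD (List.take row.toNat matrix) j [])))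
      (fun i => !((PySem.List.pyRange 0 (column - 1) 1).foldl (fun fl j =>
        if PySem.List.pyGetD (PySem.List.pyGetD matrix i []) j 0 >
           PySem.List.pyGetD (PySem.List.pyGetD matrix i []) (j + 1) 0 then true else fl) false))
      ((PySem.List.pyRange 0 row 1).reverse)
      (fun x hx => by
        simp only [Function.comp_apply]
        exact (pv_bridge matrix row column h2c h4' x hx).symm)
    rw [hcong]
    set FA := List.find?
      (fun i => !((PySem.List.pyRange 0 (column - 1) 1).foldl (fun fl j =>
        if PySem.List.pyGetD (PySem.List.pyGetD matrix i []) j 0 >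
           PySem.List.pyGetD (PySem.List.pyGetD matrix i []) (j + 1) 0 then true else fl) false))
      ((PySem.List.pyRange 0 row 1).reverse) with hFA
    obtain ⟨i0, hi0m, hi0p⟩ := h5
    have hsome : FA.isSome := by
      rw [hFA, List.find?_isSome]
      refine ⟨((i0 : Nat) : Int), ?_, ?_⟩
      · rw [List.mem_reverse, PySem.List.mem_pyRange_one]
        constructor <;> [omega; omega]
      · rw [pv_bridge matrix row column h2c h4' _
          (by rw [List.mem_reverse, PySem.List.mem_pyRange_one]; constructor <;> [omega; omega])]
        apply decide_eq_true
        rw [pv_sorted_fix_iff]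
        have hX : PySem.List.pyGetD (List.take row.toNat matrix) ((i0 : Nat) : Int) [] = matrix.getD i0 [] := by
          rw [PySem.List.pyGetD_natCast, pv_getD_take _ _ _ (by omega)]
        rw [hX]
        exact hi0p
    obtain ⟨i, hi⟩ := Option.isSome_iff_exists.mp hsome
    have hmem : i ∈ (PySem.List.pyRange 0 row 1).reverse := List.mem_of_find?_eq_some (hFA ▸ hi)
    have hpred := List.find?_some (hFA ▸ hi)
    rw [List.mem_reverse, PySem.List.mem_pyRange_one] at hmem
    obtain ⟨hi0', hir'⟩ := hmem
    rw [hi]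
    simp only [Option.getD_some, Option.map_some]
    rw [if_pos (show i ≠ -1 by omega)]
    rw [pv_factor column i (by omega) _ matrix (by omega)]
    have hgA : PySem.List.pyGetD matrix i [] = matrix.getD i.toNat [] := by
      conv_lhs => rw [show i = ((i.toNat : Nat) : Int) by omega]
      rw [PySem.List.pyGetD_natCast]
    have hgB : PySem.List.pyGetD (List.take row.toNat matrix) i [] = matrix.getD i.toNat [] := by
      conv_lhs => rw [show i = ((i.toNat : Nat) : Int) by omega]
      rw [PySem.List.pyGetD_natCast, pv_getD_take _ _ _ (by omega)]
    rw [hgA]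
    rw [pv_swap column _ h2c (h4' i.toNat (by omega))]
    simp only [hgB]

-- ===== VERDICT (by name: the statement is the Claim_ definition above) =====
theorem matrix_change_spec : Claim_equal_matrix_change := by
  intro matrix row column _ hpre
  exact matrix_change_spec_aux matrix row column hpre
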